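-- pv_equiv track=rewrite | github.com/lake041/sesac-algorithm | 최성혁/프로그래머스/Lv02/전력망을 둘로 나누기.py | solution
-- ===== SOURCE A (Python) =====
-- def dfs(start, v, wire, n):
--     v[start] = True
--     cnt = 1
--     for w in wire[start]:
--         if not v[w]:
--             cnt += dfs(w, v, wire, n)
--     return cnt
--
-- def solution(n, wires):
--     wireNode = [[] for _ in range(n + 1)]
--
--     for a, b in wires:
--         wireNode[a].append(b)
--         wireNode[b].append(a)
--
--     answer = float('inf')
--
--     for i in range(1, n + 1):
--         visited = [False] * (n + 1)
--         visited[i] = True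
--         cnt = dfs(1, visited, wireNode, n)
--         answer = min(answer, abs(n - 2 * cnt))
--
--     return answer
-- ===== SOURCE B (Python) =====
-- def solution(n, wires):
--     adj = [[] for _ in range(n + 1)]
--     for a, b in wires:
--         adj[a].append(b)
--         adj[b].append(a)
--
--     best = []
--     for i in range(1, n + 1):
--         visited = [False] * (n + 1)
--         visited[i] = True
--         # iterative DFS from node 1 with an explicit stack (no recursion)
--         visited[1] = True
--         cnt = 1
--         stack = list(reversed(adj[1]))
--         while stack:
--             x = stack.pop()
--             if not visited[x]:
--                 visited[x] = True
--                 cnt += 1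
--                 stack.extend(reversed(adj[x]))
--         best.append(abs(n - 2 * cnt))
--     return min(best)
-- ===== Notes on version B (the rewrite author's own statement) =====
-- stated objective: alternative
-- what changed: A's recursive DFS (per-node counts summed through return values, repeated for every removed node i) is replaced by an explicit-stack iterative DFS with a single running counter per removed node; the outer per-i minimum is collected into a list and taken with min(). Pre_ excludes n <= 0 (A returns the float inf) and out-of-range wire endpoints (IndexError in both).
-- outside the precondition, e.g. on solution(0, []): A returns inf, B raises ValueError
import Mathlib
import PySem

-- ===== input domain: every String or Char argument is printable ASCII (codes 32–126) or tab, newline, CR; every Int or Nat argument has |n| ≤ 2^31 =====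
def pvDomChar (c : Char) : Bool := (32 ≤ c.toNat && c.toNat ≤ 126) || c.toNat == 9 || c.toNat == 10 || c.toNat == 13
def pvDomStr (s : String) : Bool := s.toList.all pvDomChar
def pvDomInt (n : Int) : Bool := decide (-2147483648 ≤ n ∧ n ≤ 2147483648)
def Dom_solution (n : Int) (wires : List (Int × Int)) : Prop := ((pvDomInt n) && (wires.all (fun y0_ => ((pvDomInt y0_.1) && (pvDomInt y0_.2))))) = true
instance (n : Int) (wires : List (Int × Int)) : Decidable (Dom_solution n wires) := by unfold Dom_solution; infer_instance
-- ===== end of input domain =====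

-- B replaces A's recursive per-node DFS by an explicit-stack iterative DFS with a running
-- counter (same asymptotic cost; a different decomposition). Equivalence of the return value.

-- Shared primitives (both Source A and Source B build the adjacency lists and index the visited
-- array with the very same Python code; Python list indexing, incl. negative wraparound,
-- is pyGet?/pySetD — the .getD default is only reached where Python raises IndexError,
-- which Pre_solution excludes).
def cntF (v : List Bool) : Nat := v.count false
def getV (v : List Bool) (i : Int) : Bool := (PySem.List.pyGet? v i).getD true
def markV (v : List Bool) (i : Int) : List Bool := PySem.List.pySetD v i true
def adjAt (w : List (List Int)) (i : Int) : List Int := (PySem.List.pyGet? w i).getD []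
def addEdge (w : List (List Int)) (i x : Int) : List (List Int) :=
  PySem.List.pySetD w i (adjAt w i ++ [x])
def buildWire (n : Int) (wires : List (Int × Int)) : List (List Int) :=
  wires.foldl (fun wn p => addEdge (addEdge wn p.1 p.2) p.2 p.1) (List.replicate (n + 1).toNat [])

-- termination lemma for loopB (cited by its decreasing_by)
theorem cntF_markV_lt {v : List Bool} {x : Int} (h : getV v x = false) :
    cntF (markV v x) < cntF v := by
  unfold getV markV PySem.List.pySetD PySem.List.pySet? PySem.List.pyGet? at *
  cases hk : PySem.List.pyIdx? v.length x with
  | none => simp [hk] at h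
  | some k =>
    simp only [hk, Option.bind_some, Option.map_some, Option.getD_some] at h ⊢
    have hklt : k < v.length := by
      by_contra hge
      simp [List.getElem?_eq_none (by omega : v.length ≤ k)] at h
    have hvk : v[k] = false := by
      have h' : v[k]? = some false := by
        rw [List.getElem?_eq_getElem hklt] at h ⊢
        simpa using h
      rw [List.getElem?_eq_getElem hklt] at h'
      exact Option.some.inj h'
    have hpos : 0 < v.count false :=
      List.count_pos_iff.mpr (hvk ▸ List.getElem_mem hklt)
    unfold cntF
    rw [List.count_set hklt]
    simp [hvk]
    exact hvk ▸ List.getElem_mem hklt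

-- ===== PORT A =====
mutual
def dfsA (wire : List (List Int)) : Nat → Int → List Bool → Int × List Bool
  | 0, start, v => (1, markV v start)
  | Nat.succ f, start, v => goA wire f (adjAt wire start) 1 (markV v start)
termination_by f _ _ => (f, 0)
def goA (wire : List (List Int)) (f : Nat) : List Int → Int → List Bool → Int × List Bool
  | [], cnt, v => (cnt, v)
  | w :: t, cnt, v =>
    if getV v w = false then
      let r := dfsA wire f w v
      goA wire f t (cnt + r.1) r.2
    else goA wire f t cnt v
termination_by l _ _ => (f, l.length + 1)
end

-- A: answer starts as float('inf'); modelled as Option Int (none = inf). For n ≤ 0 the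
-- Python returns the float inf itself (no Int value): outside Pre_solution; .getD 0 there.
def solution (n : Int) (wires : List (Int × Int)) : Int :=
  let wireNode := buildWire n wires
  let answer :=
    (PySem.List.pyRange 1 (n + 1) 1).foldl (fun acc i =>
      let visited := markV (List.replicate (n + 1).toNat false) i
      let cnt := (dfsA wireNode (visited.length + 1) 1 visited).1
      match acc with
      | none => some |n - 2 * cnt|
      | some a => some (min a |n - 2 * cnt|)) (none : Option Int)
  answer.getD 0

-- ===== PORT B =====
-- Source B's stack (top at the Python list's end; stack.extend(reversed(adj[x]))) is encoded
-- with the top at the head, so the push step is 'adjAt wire x ++ rest'.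
def loopB (wire : List (List Int)) (stack : List Int) (cnt : Int) (v : List Bool) : Int :=
  match stack with
  | [] => cnt
  | x :: rest =>
    if h : getV v x = false then
      loopB wire (adjAt wire x ++ rest) (cnt + 1) (markV v x)
    else
      loopB wire rest cnt v
termination_by (cntF v, stack.length)
decreasing_by
  · exact Prod.Lex.left _ _ (cntF_markV_lt h)
  · exact Prod.Lex.right _ (Nat.lt_succ_self _)

-- Python min([]) raises ValueError (only when n ≤ 0): outside Pre_solution; .getD 0 there.
def solution_alt (n : Int) (wires : List (Int × Int)) : Int :=
  let adj := buildWire n wires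
  let best :=
    (PySem.List.pyRange 1 (n + 1) 1).foldl (fun acc i =>
      let v0 := markV (List.replicate (n + 1).toNat false) i
      let v1 := markV v0 1
      let cnt := loopB adj (adjAt adj 1) 1 v1
      acc ++ [|n - 2 * cnt|]) []
  (PySem.List.min? best (fun y => y)).getD 0

-- ===== PRECONDITION & SPEC =====
-- Pre_ excludes exactly the inputs where the Python raises or returns no Int: n ≤ 0
-- (A returns the float inf) and wire endpoints outside Python's index range for a list
-- of length n+1 (IndexError in both programs).
def Pre_solution (n : Int) (wires : List (Int × Int)) : Prop :=
  1 ≤ n ∧ ∀ p ∈ wires, -(n + 1) ≤ p.1 ∧ p.1 ≤ n ∧ -(n + 1) ≤ p.2 ∧ p.2 ≤ n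
instance (n : Int) (wires : List (Int × Int)) : Decidable (Pre_solution n wires) := by
  unfold Pre_solution; infer_instance
def pvWitness_solution : Int × (List (Int × Int)) := (4, [(1, 2), (2, 3), (3, 4)])

def Spec_solution (n : Int) (wires : List (Int × Int)) (out : Int) : Prop := out = solution_alt n wires
instance (n : Int) (wires : List (Int × Int)) (out : Int) : Decidable (Spec_solution n wires out) := by unfold Spec_solution; infer_instance

-- ===== CLAIM (what is proved, stated in full; the proofs are below) =====
def Claim_equal_solution : Prop := ∀ (n : Int) (wires : List (Int × Int)), Dom_solution n wires → Pre_solution n wires → Spec_solution n wires (solution n wires)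

-- ===== LEMMAS AND PROOFS =====

theorem cntF_markV_le (v : List Bool) (x : Int) : cntF (markV v x) ≤ cntF v := by
  unfold markV PySem.List.pySetD PySem.List.pySet?
  cases hk : PySem.List.pyIdx? v.length x with
  | none => simp
  | some k =>
    simp only [Option.map_some, Option.getD_some]
    by_cases hklt : k < v.length
    · unfold cntF
      rw [List.count_set hklt]
      by_cases hb : (v[k] == false) = true <;> simp [hb]
    · unfold cntF
      rw [List.set_eq_of_length_le (by omega)]

theorem cntF_pos {v : List Bool} {w : Int} (h : getV v w = false) : 0 < cntF v := by
  unfold getV at h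
  cases hg : PySem.List.pyGet? v w with
  | none => simp [hg] at h
  | some b =>
    rw [hg] at h
    simp at h
    subst h
    unfold PySem.List.pyGet? at hg
    cases hk : PySem.List.pyIdx? v.length w with
    | none => rw [hk] at hg; simp at hg
    | some k =>
      rw [hk] at hg
      simp at hg
      exact List.count_pos_iff.mpr (List.mem_of_getElem? hg)

theorem length_markV (v : List Bool) (i : Int) : (markV v i).length = v.length := by
  unfold markV
  exact PySem.List.length_pySetD v i true

theorem goA_shift (wire : List (List Int)) (f : Nat) (l : List Int) :
    ∀ (v : List Bool) (cnt : Int),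
      goA wire f l cnt v = ((goA wire f l 0 v).1 + cnt, (goA wire f l 0 v).2) := by
  induction l with
  | nil => intro v cnt; simp [goA]
  | cons w t ih =>
    intro v cnt
    by_cases h : getV v w = false
    · simp only [goA, h, if_true]
      rw [ih _ (cnt + (dfsA wire f w v).1), ih _ (0 + (dfsA wire f w v).1)]
      simp only [Prod.mk.injEq]
      refine ⟨by ring, trivial⟩
    · simp only [goA, h]
      exact ih v cnt

theorem goA_mono_aux (wire : List (List Int)) (f : Nat)
    (hd : ∀ s v, cntF (dfsA wire f s v).2 ≤ cntF v) :
    ∀ (l : List Int) (cnt : Int) (v : List Bool), cntF (goA wire f l cnt v).2 ≤ cntF v := by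
  intro l
  induction l with
  | nil => intro cnt v; simp [goA]
  | cons w t ih =>
    intro cnt v
    by_cases h : getV v w = false
    · simp only [goA, h, if_true]
      exact le_trans (ih _ _) (hd w v)
    · simp only [goA, h]
      exact ih cnt v

theorem dfsA_mono (wire : List (List Int)) :
    ∀ (f : Nat) (s : Int) (v : List Bool), cntF (dfsA wire f s v).2 ≤ cntF v := by
  intro f
  induction f with
  | zero => intro s v; simpa [dfsA] using cntF_markV_le v s
  | succ f ih =>
    intro s v
    simp only [dfsA]
    exact le_trans (goA_mono_aux wire f ih _ _ _) (cntF_markV_le v s)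

theorem goA_mono (wire : List (List Int)) (f : Nat) (l : List Int) (cnt : Int) (v : List Bool) :
    cntF (goA wire f l cnt v).2 ≤ cntF v :=
  goA_mono_aux wire f (dfsA_mono wire f) l cnt v

theorem sim (wire : List (List Int)) :
    ∀ (k : Nat) (v : List Bool), cntF v ≤ k → ∀ (f : Nat), cntF v ≤ f →
      ∀ (l S : List Int) (cnt : Int),
        loopB wire (l ++ S) cnt v
          = loopB wire S ((goA wire f l 0 v).1 + cnt) (goA wire f l 0 v).2 := by
  intro k
  induction k with
  | zero =>
    intro v hv f hf l
    induction l with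
    | nil => intro S cnt; simp [goA]
    | cons w t ih =>
      intro S cnt
      have hw : ¬ getV v w = false := fun h => absurd (cntF_pos h) (by omega)
      rw [List.cons_append, loopB]
      simp only [hw, goA]
      exact ih S cnt
  | succ k ihk =>
    intro v hv f hf l
    induction l with
    | nil => intro S cnt; simp [goA]
    | cons w t ih =>
      intro S cnt
      by_cases hw : getV v w = false
      · have hpos : 0 < cntF v := cntF_pos hw
        obtain ⟨f', rfl⟩ : ∃ f', f = f' + 1 := ⟨f - 1, by omega⟩
        have hlt := cntF_markV_lt hw
        rw [List.cons_append, loopB]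
        simp only [hw, dif_pos]
        rw [ihk (markV v w) (by omega) f' (by omega) (adjAt wire w) (t ++ S) (cnt + 1)]
        have h2 : cntF (goA wire f' (adjAt wire w) 0 (markV v w)).2 ≤ k :=
          le_trans (goA_mono wire f' _ _ _) (by omega)
        have h2f : cntF (goA wire f' (adjAt wire w) 0 (markV v w)).2 ≤ f' + 1 :=
          le_trans (goA_mono wire f' _ _ _) (by omega)
        rw [ihk _ h2 (f' + 1) h2f t S _]
        have hstep : goA wire (f' + 1) (w :: t) 0 v
            = ((goA wire (f' + 1) t 0 (goA wire f' (adjAt wire w) 0 (markV v w)).2).1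
                + ((goA wire f' (adjAt wire w) 0 (markV v w)).1 + 1),
               (goA wire (f' + 1) t 0 (goA wire f' (adjAt wire w) 0 (markV v w)).2).2) := by
          simp only [goA, hw, if_true, dfsA]
          rw [goA_shift wire f' (adjAt wire w) (markV v w) 1]
          rw [goA_shift wire (f' + 1) t]
          simp only [Prod.mk.injEq]
          exact ⟨by ring, trivial⟩
        rw [hstep]
        congr 1
        ring
      · rw [List.cons_append, loopB]
        simp only [hw, goA]
        exact ih S cnt

theorem cnt_eq (wire : List (List Int)) (vI : List Bool) :
    loopB wire (adjAt wire 1) 1 (markV vI 1) = (dfsA wire (vI.length + 1) 1 vI).1 := by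
  have hlen : cntF (markV vI 1) ≤ vI.length := by
    have h1 : cntF (markV vI 1) ≤ (markV vI 1).length := List.count_le_length
    rwa [length_markV] at h1
  have h := sim wire (cntF (markV vI 1)) (markV vI 1) le_rfl vI.length hlen
    (adjAt wire 1) [] 1
  rw [List.append_nil] at h
  rw [h, loopB]
  simp only [dfsA]
  rw [goA_shift wire vI.length (adjAt wire 1) (markV vI 1) 1]

theorem optfold_min (xs : List Int) :
    (xs.foldl (fun acc x => match acc with
      | none => some x
      | some a => some (min a x)) (none : Option Int))
      = PySem.List.min? xs (fun y => y) := by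
  unfold PySem.List.min?
  congr 1
  funext acc x
  cases acc with
  | none => rfl
  | some a =>
    by_cases hx : x < a <;> simp [hx, min_def]

theorem solution_spec : Claim_equal_solution := by
  intro n wires _ _
  unfold Spec_solution solution solution_alt
  simp only []
  rw [PySem.List.foldl_append_singleton_eq_map
    (fun i => |n - 2 * loopB (buildWire n wires) (adjAt (buildWire n wires) 1) 1
      (markV (markV (List.replicate (n + 1).toNat false) i) 1)|)]
  rw [List.nil_append]
  have hmap : (PySem.List.pyRange 1 (n + 1) 1).map
      (fun i => |n - 2 * loopB (buildWire n wires) (adjAt (buildWire n wires) 1) 1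
        (markV (markV (List.replicate (n + 1).toNat false) i) 1)|)
      = (PySem.List.pyRange 1 (n + 1) 1).map
      (fun i => |n - 2 * (dfsA (buildWire n wires)
          ((markV (List.replicate (n + 1).toNat false) i).length + 1) 1
          (markV (List.replicate (n + 1).toNat false) i)).1|) := by
    refine List.map_congr_left (fun i _ => ?_)
    rw [cnt_eq]
  rw [hmap, ← optfold_min, List.foldl_map]
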